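-- pv_equiv track=rewrite | github.com/tjysdsg/MMML-Fall22 | webqa_stat.py | get_topic_overlap
-- ===== SOURCE A (Python) =====
-- def get_topic_overlap(train_topic_count, val_topic_count):
--     train_topic = set(train_topic_count.keys())
--     val_topic = set(val_topic_count.keys())
--     shared_topic = train_topic.intersection(val_topic)
--     train_unique_topic = train_topic - shared_topic
--     val_unique_topic = val_topic - shared_topic
--
--     unique_val_topic_samples = 0
--     unique_train_topic_samples = 0
--     for topic in val_unique_topic:
--         unique_val_topic_samples += val_topic_count[topic]
--
--     for topic in train_unique_topic:
--         unique_train_topic_samples += train_topic_count[topic]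
--
--     return len(shared_topic), len(train_unique_topic), len(val_unique_topic), unique_train_topic_samples, unique_val_topic_samples
-- ===== SOURCE B (Python) =====
-- def get_topic_overlap(train_topic_count, val_topic_count):
--     # One fused pass per dict: classify each topic and accumulate counts/sums,
--     # without materialising the shared/unique sets.
--     shared = train_unique = train_sum = 0
--     for t, c in train_topic_count.items():
--         if t in val_topic_count:
--             shared += 1
--         else:
--             train_unique += 1
--             train_sum += c
--     val_unique = val_sum = 0
--     for t, c in val_topic_count.items():
--         if t not in train_topic_count:
--             val_unique += 1
--             val_sum += c
--     return shared, train_unique, val_unique, train_sum, val_sum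
-- ===== Notes on version B (the rewrite author's own statement) =====
-- stated objective: simpler
-- what changed: Replaces the set algebra (key sets, intersection, two differences) plus two separate summing loops by two fused passes over the dict items that classify each topic by membership and accumulate the counts and sums on the fly.
import Mathlib
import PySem

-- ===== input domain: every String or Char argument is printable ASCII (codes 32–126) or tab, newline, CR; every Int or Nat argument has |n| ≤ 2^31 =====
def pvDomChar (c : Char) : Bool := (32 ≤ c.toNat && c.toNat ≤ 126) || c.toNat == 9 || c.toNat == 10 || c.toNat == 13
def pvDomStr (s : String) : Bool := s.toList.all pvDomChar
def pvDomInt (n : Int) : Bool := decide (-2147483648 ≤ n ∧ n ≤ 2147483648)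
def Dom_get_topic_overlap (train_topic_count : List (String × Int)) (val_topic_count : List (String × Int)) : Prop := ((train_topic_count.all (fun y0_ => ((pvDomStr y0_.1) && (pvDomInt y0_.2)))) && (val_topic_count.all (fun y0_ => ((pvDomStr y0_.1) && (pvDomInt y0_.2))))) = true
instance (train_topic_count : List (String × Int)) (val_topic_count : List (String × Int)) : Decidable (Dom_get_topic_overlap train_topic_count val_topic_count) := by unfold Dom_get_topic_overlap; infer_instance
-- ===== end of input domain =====

-- B replaces A's set algebra (key sets, intersection, two set differences, two summing
-- loops) by one fused classifying/accumulating pass over each dict's items; same cost.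

-- ===== PORT A =====
def get_topic_overlap (train_topic_count : List (String × Int)) (val_topic_count : List (String × Int)) : Int × Int × Int × Int × Int :=
  let td := PySem.Dict.ofList train_topic_count
  let vd := PySem.Dict.ofList val_topic_count
  let train_topic : PySem.Set String := PySem.Set.ofList td.keys
  let val_topic : PySem.Set String := PySem.Set.ofList vd.keys
  let shared_topic := PySem.Set.inter train_topic val_topic
  let train_unique_topic := PySem.Set.diff train_topic shared_topic
  let val_unique_topic := PySem.Set.diff val_topic shared_topic
  let unique_val_topic_samples := val_unique_topic.foldl (fun s t => s + vd.getD t 0) 0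
  let unique_train_topic_samples := train_unique_topic.foldl (fun s t => s + td.getD t 0) 0
  (PySem.Set.len shared_topic, PySem.Set.len train_unique_topic, PySem.Set.len val_unique_topic,
   unique_train_topic_samples, unique_val_topic_samples)

-- ===== PORT B =====
def get_topic_overlap_alt (train_topic_count : List (String × Int)) (val_topic_count : List (String × Int)) : Int × Int × Int × Int × Int :=
  let td := PySem.Dict.ofList train_topic_count
  let vd := PySem.Dict.ofList val_topic_count
  let t3 := td.items.foldl (fun (st : Int × Int × Int) p =>
      if vd.contains p.1 then (st.1 + 1, st.2.1, st.2.2)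
      else (st.1, st.2.1 + 1, st.2.2 + p.2)) (0, 0, 0)
  let v2 := vd.items.foldl (fun (st : Int × Int) p =>
      if td.contains p.1 then st else (st.1 + 1, st.2 + p.2)) (0, 0)
  (t3.1, t3.2.1, v2.1, t3.2.2, v2.2)

-- ===== PRECONDITION & SPEC =====
def Spec_get_topic_overlap (train_topic_count : List (String × Int)) (val_topic_count : List (String × Int)) (out : Int × Int × Int × Int × Int) : Prop :=
  out = get_topic_overlap_alt train_topic_count val_topic_count
instance (train_topic_count : List (String × Int)) (val_topic_count : List (String × Int)) (out : Int × Int × Int × Int × Int) : Decidable (Spec_get_topic_overlap train_topic_count val_topic_count out) := by unfold Spec_get_topic_overlap; infer_instance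

-- ===== CLAIM =====
def Claim_equal_get_topic_overlap : Prop := ∀ (train_topic_count : List (String × Int)) (val_topic_count : List (String × Int)), Dom_get_topic_overlap train_topic_count val_topic_count → Spec_get_topic_overlap train_topic_count val_topic_count (get_topic_overlap train_topic_count val_topic_count)

-- ===== LEMMAS AND PROOFS =====

-- B's train-side fold computes the shared count, the unique count and the unique sum.
theorem foldl_triple (l : List (String × Int)) (mem : String → Bool) (a b c : Int) :
    l.foldl (fun (st : Int × Int × Int) p =>
      if mem p.1 then (st.1 + 1, st.2.1, st.2.2)
      else (st.1, st.2.1 + 1, st.2.2 + p.2)) (a, b, c)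
    = (a + ((l.filter (fun p => mem p.1)).length : Int),
       b + ((l.filter (fun p => !mem p.1)).length : Int),
       c + ((l.filter (fun p => !mem p.1)).map (·.2)).sum) := by
  induction l generalizing a b c with
  | nil => simp
  | cons h t ih =>
    by_cases hm : mem h.1 = true <;>
      simp [List.foldl_cons, hm, ih] <;> push_cast <;> ring_nf <;> simp

-- B's val-side fold computes the unique count and the unique sum.
theorem foldl_pair (l : List (String × Int)) (mem : String → Bool) (a b : Int) :
    l.foldl (fun (st : Int × Int) p =>
      if mem p.1 then st else (st.1 + 1, st.2 + p.2)) (a, b)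
    = (a + ((l.filter (fun p => !mem p.1)).length : Int),
       b + ((l.filter (fun p => !mem p.1)).map (·.2)).sum) := by
  induction l generalizing a b with
  | nil => simp
  | cons h t ih =>
    by_cases hm : mem h.1 = true <;>
      simp [List.foldl_cons, hm, ih] <;> push_cast <;> ring_nf <;> simp

-- A's shared set, as a filter of the train items.
theorem shared_eq (td vd : PySem.Dict String Int) :
    PySem.Set.inter (td.keys) (vd.keys)
      = (td.items.filter (fun p => vd.contains p.1)).map (·.1) := by
  show td.keys.filter (fun x => PySem.Set.contains vd.keys x) = _
  rw [show td.keys = td.items.map (·.1) from rfl, List.filter_map]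
  congr 1
  apply List.filter_congr
  intro p _
  simp [PySem.Dict.contains_eq_decide_mem_keys, Function.comp]

-- A's train-unique set, as a filter of the train items.
theorem unique_train_eq (td vd : PySem.Dict String Int) :
    PySem.Set.diff (td.keys) (PySem.Set.inter (td.keys) (vd.keys))
      = (td.items.filter (fun p => !vd.contains p.1)).map (·.1) := by
  show td.keys.filter (fun x => !PySem.Set.contains (PySem.Set.inter td.keys vd.keys) x) = _
  have h2 : td.keys.filter (fun x => !PySem.Set.contains (PySem.Set.inter td.keys vd.keys) x)
      = td.keys.filter (fun x => !vd.contains x) := by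
    apply List.filter_congr
    intro x hx
    have : PySem.Set.contains (PySem.Set.inter td.keys vd.keys) x = vd.contains x := by
      simp [PySem.Set.contains_eq_listContains, PySem.Set.mem_inter,
        PySem.Dict.contains_eq_decide_mem_keys, hx]
    rw [this]
  rw [h2, show td.keys = td.items.map (·.1) from rfl, List.filter_map]
  rfl

-- A's val-unique set, as a filter of the val items.
theorem unique_val_eq (td vd : PySem.Dict String Int) :
    PySem.Set.diff (vd.keys) (PySem.Set.inter (td.keys) (vd.keys))
      = (vd.items.filter (fun p => !td.contains p.1)).map (·.1) := by
  show vd.keys.filter (fun x => !PySem.Set.contains (PySem.Set.inter td.keys vd.keys) x) = _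
  have h2 : vd.keys.filter (fun x => !PySem.Set.contains (PySem.Set.inter td.keys vd.keys) x)
      = vd.keys.filter (fun x => !td.contains x) := by
    apply List.filter_congr
    intro x hx
    have : PySem.Set.contains (PySem.Set.inter td.keys vd.keys) x = td.contains x := by
      simp [PySem.Set.contains_eq_listContains, PySem.Set.mem_inter,
        PySem.Dict.contains_eq_decide_mem_keys, hx]
    rw [this]
  rw [h2, show vd.keys = vd.items.map (·.1) from rfl, List.filter_map]
  rfl

-- A's summing loop over a list of keys of items of td equals the sum of the items' values.
theorem sum_eq (td : PySem.Dict String Int) (hkt : td.keys.Nodup)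
    (l : List (String × Int)) (hl : ∀ p ∈ l, p ∈ td.items) :
    ((l.map (·.1)).foldl (fun s t => s + td.getD t 0) 0) = (l.map (·.2)).sum := by
  rw [PySem.List.foldl_add, List.map_map]
  have : l.map ((fun t => td.getD t 0) ∘ (·.1)) = l.map (·.2) := by
    apply List.map_congr_left
    intro p hp
    have := PySem.Dict.getD_of_mem_items (d := td) (k := p.1) (v := p.2) (d0 := 0)
      (by simpa using hl p hp) hkt
    simpa using this
  simp [this]

-- ===== VERDICT =====
theorem get_topic_overlap_spec : Claim_equal_get_topic_overlap := by
  intro train val _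
  unfold Spec_get_topic_overlap get_topic_overlap get_topic_overlap_alt
  have hkt : (PySem.Dict.ofList train).keys.Nodup := PySem.Dict.nodup_keys_ofList train
  have hkv : (PySem.Dict.ofList val).keys.Nodup := PySem.Dict.nodup_keys_ofList val
  set td := PySem.Dict.ofList train with htd
  set vd := PySem.Dict.ofList val with hvd
  show (PySem.Set.len (PySem.Set.inter (PySem.Set.ofList td.keys) (PySem.Set.ofList vd.keys)),
        PySem.Set.len (PySem.Set.diff (PySem.Set.ofList td.keys)
          (PySem.Set.inter (PySem.Set.ofList td.keys) (PySem.Set.ofList vd.keys))),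
        PySem.Set.len (PySem.Set.diff (PySem.Set.ofList vd.keys)
          (PySem.Set.inter (PySem.Set.ofList td.keys) (PySem.Set.ofList vd.keys))),
        (PySem.Set.diff (PySem.Set.ofList td.keys)
          (PySem.Set.inter (PySem.Set.ofList td.keys) (PySem.Set.ofList vd.keys))).foldl
            (fun s t => s + td.getD t 0) 0,
        (PySem.Set.diff (PySem.Set.ofList vd.keys)
          (PySem.Set.inter (PySem.Set.ofList td.keys) (PySem.Set.ofList vd.keys))).foldl
            (fun s t => s + vd.getD t 0) 0)
      = (let t3 := td.items.foldl (fun (st : Int × Int × Int) p =>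
             if vd.contains p.1 then (st.1 + 1, st.2.1, st.2.2)
             else (st.1, st.2.1 + 1, st.2.2 + p.2)) (0, 0, 0)
         let v2 := vd.items.foldl (fun (st : Int × Int) p =>
             if td.contains p.1 then st else (st.1 + 1, st.2 + p.2)) (0, 0)
         (t3.1, t3.2.1, v2.1, t3.2.2, v2.2))
  rw [PySem.Set.ofList_eq_self_of_nodup td.keys hkt, PySem.Set.ofList_eq_self_of_nodup vd.keys hkv]
  rw [unique_train_eq, unique_val_eq, shared_eq]
  rw [sum_eq td hkt _ (fun p hp => List.mem_of_mem_filter hp),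
      sum_eq vd hkv _ (fun p hp => List.mem_of_mem_filter hp)]
  rw [foldl_triple td.items (fun k => vd.contains k),
      foldl_pair vd.items (fun k => td.contains k)]
  simp [PySem.Set.len]
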